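-- pv_equiv track=rewrite | github.com/skynyrd/algo | codefight/arrays/matrix_element_sum/solution.py | matrix_element_sum
-- ===== SOURCE A (Python) =====
-- def matrix_element_sum(matrix):
--     column_map = {}
--     price = 0
--
--     for row in matrix:
--         for index, item in enumerate(row):
--             if item == 0:
--                 column_map[str(index)] = False
--             else:
--                 check_price = column_map.get(str(index), True)
--                 if check_price:
--                     price += item
--
--     return price
-- ===== SOURCE B (Python) =====
-- def matrix_element_sum(matrix):
--     cols = max((len(r) for r in matrix), default=0)
--     price = 0
--     for c in range(cols):
--         for row in matrix:
--             if c >= len(row):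
--                 continue
--             if row[c] == 0:
--                 break
--             price += row[c]
--     return price
-- ===== Notes on version B (the rewrite author's own statement) =====
-- stated objective: simpler
-- what changed: Replaces A's row-major scan with a str-keyed haunted-column dict by a column-major scan that breaks at the first zero in each column, eliminating the dict entirely.
import Mathlib
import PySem

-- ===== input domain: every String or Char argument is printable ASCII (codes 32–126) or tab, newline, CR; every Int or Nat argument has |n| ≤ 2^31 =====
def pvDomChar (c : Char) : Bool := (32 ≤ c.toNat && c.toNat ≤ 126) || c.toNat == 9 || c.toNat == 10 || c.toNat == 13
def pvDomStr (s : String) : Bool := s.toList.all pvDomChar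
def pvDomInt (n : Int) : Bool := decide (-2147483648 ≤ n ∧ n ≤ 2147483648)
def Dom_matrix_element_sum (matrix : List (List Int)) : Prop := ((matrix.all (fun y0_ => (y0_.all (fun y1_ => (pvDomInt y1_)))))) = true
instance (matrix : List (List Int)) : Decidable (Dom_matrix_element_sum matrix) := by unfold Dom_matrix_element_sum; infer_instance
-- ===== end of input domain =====

-- B replaces A's row-major scan with a str-keyed haunted-column dict by a
-- column-major scan that breaks at the first zero in each column (no dict); objective: simpler.


-- ===== PORT A =====
-- inner loop body: for index, item in enumerate(row): …
def aStep (st : PySem.Dict String Bool × Int) (cell : Int × Int) : PySem.Dict String Bool × Int :=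
  if cell.2 == 0 then (st.1.insert (PySem.Int.toStr cell.1) false, st.2)
  else if st.1.getD (PySem.Int.toStr cell.1) true then (st.1, st.2 + cell.2)
  else (st.1, st.2)

def aRow (st : PySem.Dict String Bool × Int) (row : List Int) : PySem.Dict String Bool × Int :=
  (PySem.List.enumerate row).foldl aStep st

def matrix_element_sum (matrix : List (List Int)) : Int :=
  (matrix.foldl aRow (PySem.Dict.empty, 0)).2

-- ===== PORT B =====
-- inner loop of Source B: scan rows for one column c, 'continue' on short rows, 'break' on a zero.
-- row[c] is ported as pyGetD row c 0, exact here because the branch guarantees 0 ≤ c < len row.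
def bCol (c : Int) (rows : List (List Int)) (price : Int) : Int :=
  match rows with
  | [] => price
  | row :: rest =>
      if c ≥ PySem.List.len row then bCol c rest price
      else if PySem.List.pyGetD row c 0 == 0 then price
      else bCol c rest (price + PySem.List.pyGetD row c 0)

def matrix_element_sum_alt (matrix : List (List Int)) : Int :=
  let cols := PySem.List.maxD (matrix.map PySem.List.len) (fun x => x) 0
  (PySem.List.pyRange 0 cols 1).foldl (fun price c => bCol c matrix price) 0

-- ===== PRECONDITION & SPEC =====
def Spec_matrix_element_sum (matrix : List (List Int)) (out : Int) : Prop := out = matrix_element_sum_alt matrix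
instance (matrix : List (List Int)) (out : Int) : Decidable (Spec_matrix_element_sum matrix out) := by unfold Spec_matrix_element_sum; infer_instance

-- ===== CLAIM (what is proved, stated in full; the proofs are below) =====
def Claim_equal_matrix_element_sum : Prop := ∀ (matrix : List (List Int)), Dom_matrix_element_sum matrix → Spec_matrix_element_sum matrix (matrix_element_sum matrix)

-- ===== LEMMAS AND PROOFS =====

-- decimal parser used only to prove injectivity of str on naturals
def pStep (a : Int) (c : Char) : Int := a * 10 + ((c.toNat : Int) - 48)

lemma digitChar_parse (d : Nat) (hd : d < 10) : ((Nat.digitChar d).toNat : Int) - 48 = d := by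
  interval_cases d <;> decide

lemma parse_toDigitsCore (f : Nat) :
    ∀ (n : Nat) (l : List Char), n < f →
      ∃ k : Nat, n < 10 ^ k ∧
        ∀ a : Int, List.foldl pStep a (Nat.toDigitsCore 10 f n l)
          = List.foldl pStep (a * 10 ^ k + n) l := by
  induction f with
  | zero => intro n l h; omega
  | succ f ih =>
    intro n l h
    by_cases h10 : n / 10 = 0
    · refine ⟨1, by omega, fun a => ?_⟩
      simp only [Nat.toDigitsCore]
      rw [if_pos h10]
      simp only [List.foldl_cons, pStep, digitChar_parse (n % 10) (by omega)]
      have : a * 10 ^ 1 + (n : Int) = a * 10 + (n % 10 : Nat) := by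
        have := Nat.div_add_mod n 10
        push_cast; omega
      rw [this]
    · obtain ⟨k, hk, hfold⟩ := ih (n / 10) ((n % 10).digitChar :: l) (by omega)
      refine ⟨k + 1, ?_, fun a => ?_⟩
      · have : n = 10 * (n / 10) + n % 10 := (Nat.div_add_mod n 10).symm
        calc n < 10 * (n / 10) + 10 := by omega
        _ ≤ 10 * 10 ^ k := by have := hk; omega
        _ = 10 ^ (k + 1) := by ring
      · simp only [Nat.toDigitsCore]
        rw [if_neg h10]
        rw [hfold a]
        simp only [List.foldl_cons, pStep, digitChar_parse (n % 10) (by omega)]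
        congr 1
        have := Nat.div_add_mod n 10
        push_cast
        ring_nf
        nlinarith [Nat.div_add_mod n 10]

lemma parse_toDigits (n : Nat) : List.foldl pStep 0 (Nat.toDigits 10 n) = n := by
  obtain ⟨k, _, hfold⟩ := parse_toDigitsCore (n + 1) n [] (by omega)
  simpa using hfold 0

lemma toStr_nat_inj (a b : Nat) (h : PySem.Int.toStr (a : Int) = PySem.Int.toStr (b : Int)) : a = b := by
  have h2 : PySem.Int.toChars (a : Int) = PySem.Int.toChars (b : Int) := by
    have := congrArg String.toList h
    simpa [PySem.Int.toList_toStr] using this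
  have ha : PySem.Int.toChars (a : Int) = Nat.toDigits 10 a := by
    simp [PySem.Int.toChars]
  have hb : PySem.Int.toChars (b : Int) = Nat.toDigits 10 b := by
    simp [PySem.Int.toChars]
  have : Nat.toDigits 10 a = Nat.toDigits 10 b := by rw [← ha, ← hb, h2]
  have := congrArg (List.foldl pStep 0) this
  rw [parse_toDigits, parse_toDigits] at this
  exact_mod_cast this

-- column abstraction
def colCells (c : Nat) (rows : List (List Int)) : List Int := rows.filterMap (fun r => r[c]?)

def hasZero (l : List Int) : Bool := l.any (fun x => x == 0)

def sumTake (c : Nat) (rows : List (List Int)) : Int :=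
  ((colCells c rows).takeWhile (fun x => x != 0)).sum

def psum (W : Nat) (rows : List (List Int)) : Int := ∑ c ∈ Finset.range W, sumTake c rows

def natWidth (rows : List (List Int)) : Nat := rows.foldl (fun acc r => max acc r.length) 0

lemma colCells_append (c : Nat) (xs ys : List (List Int)) :
    colCells c (xs ++ ys) = colCells c xs ++ colCells c ys := by
  simp [colCells]

lemma colCells_singleton (c : Nat) (r : List Int) :
    colCells c [r] = (r[c]?).toList := by
  cases h : r[c]? <;> simp [colCells, h]

lemma all_ne_eq_not_hasZero (l : List Int) : (l.all (fun x => x != 0)) = !hasZero l := by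
  induction l with
  | nil => simp [hasZero]
  | cons x xs ih => simp [hasZero, List.all_cons, List.any_cons] at *; tauto

lemma takeWhile_append_singleton (p : Int → Bool) (l : List Int) (x : Int) :
    (l ++ [x]).takeWhile p
      = if l.all p then l ++ (if p x then [x] else []) else l.takeWhile p := by
  induction l with
  | nil => cases hx : p x <;> simp [hx]
  | cons a l ih =>
    by_cases ha : p a <;> simp [ha, ih] <;> split_ifs <;> simp_all

lemma takeWhile_all_eq_self (l : List Int) (h : l.all (fun x => x != 0) = true) :
    l.takeWhile (fun x => x != 0) = l := by
  induction l with
  | nil => rfl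
  | cons a l ih => simp_all

-- the A-side loop invariant: one row processed cell by cell
lemma row_inv (W : Nat) (pre : List (List Int)) :
    ∀ (rRest rDone : List Int) (m : PySem.Dict String Bool) (p : Int),
      rDone.length + rRest.length ≤ W →
      (∀ c : Nat, m.getD (PySem.Int.toStr (c : Int)) true = !hasZero (colCells c (pre ++ [rDone]))) →
      p = psum W (pre ++ [rDone]) →
      (∀ c : Nat, ((PySem.List.enumerate rRest (rDone.length : Int)).foldl aStep (m, p)).1.getD
          (PySem.Int.toStr (c : Int)) true = !hasZero (colCells c (pre ++ [rDone ++ rRest]))) ∧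
      ((PySem.List.enumerate rRest (rDone.length : Int)).foldl aStep (m, p)).2
          = psum W (pre ++ [rDone ++ rRest]) := by
  intro rRest
  induction rRest with
  | nil => intro rDone m p _ hm hp; simpa [PySem.List.enumerate_nil] using ⟨hm, hp⟩
  | cons v rest ih =>
    intro rDone m p hlen hm hp
    have hceq : colCells rDone.length (pre ++ [rDone ++ [v]])
        = colCells rDone.length (pre ++ [rDone]) ++ [v] := by
      rw [colCells_append, colCells_append, colCells_singleton, colCells_singleton,
        List.getElem?_concat_length, List.getElem?_eq_none (le_refl rDone.length)]
      simp
    have hcne : ∀ c : Nat, c ≠ rDone.length →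
        colCells c (pre ++ [rDone ++ [v]]) = colCells c (pre ++ [rDone]) := by
      intro c hc
      rw [colCells_append, colCells_append, colCells_singleton, colCells_singleton]
      rcases Nat.lt_or_gt_of_ne hc with h | h
      · rw [List.getElem?_append_left h]
      · rw [List.getElem?_eq_none (l := rDone ++ [v]) (by simp; omega),
          List.getElem?_eq_none (l := rDone) (by omega)]
    have hslt : rDone.length < W := by simp at hlen; omega
    have key_ne : ∀ c : Nat, c ≠ rDone.length →
        PySem.Int.toStr (c : Int) ≠ PySem.Int.toStr (rDone.length : Int) :=
      fun c hc h => hc (toStr_nat_inj c rDone.length h)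
    rw [PySem.List.enumerate_cons]
    simp only [List.foldl_cons]
    have hstep : aStep (m, p) ((rDone.length : Int), v)
        = if v = 0 then (m.insert (PySem.Int.toStr (rDone.length : Int)) false, p)
          else if m.getD (PySem.Int.toStr (rDone.length : Int)) true then (m, p + v) else (m, p) := by
      simp [aStep]
    have hrw : (rDone ++ [v]) ++ rest = rDone ++ v :: rest := by simp
    have hlen' : (rDone ++ [v]).length + rest.length ≤ W := by simp at hlen ⊢; omega
    have hcast : (((rDone ++ [v]).length : Nat) : Int) = (rDone.length : Int) + 1 := by simp
    by_cases hv : v = 0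
    · -- zero cell: column rDone.length becomes haunted, price unchanged
      rw [hstep, if_pos hv]
      have hres := ih (rDone ++ [v]) (m.insert (PySem.Int.toStr (rDone.length : Int)) false) p hlen'
        (by
          intro c
          rw [PySem.Dict.getD_insert]
          by_cases hc : c = rDone.length
          · subst hc
            rw [if_pos rfl, hceq]
            simp [hasZero, List.any_append, hv]
          · rw [if_neg (key_ne c hc), hm c, hcne c hc])
        (by
          rw [hp]
          apply Finset.sum_congr rfl
          intro c _
          unfold sumTake
          by_cases hc : c = rDone.length
          · subst hc
            rw [hceq, takeWhile_append_singleton]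
            split_ifs with hall hx
            · rw [hv] at hx; simp at hx
            · rw [takeWhile_all_eq_self _ hall]; simp
            · rfl
          · rw [hcne c hc])
      rw [hcast, hrw] at hres
      exact hres
    · by_cases hchk : m.getD (PySem.Int.toStr (rDone.length : Int)) true = true
      · -- live column, nonzero cell: price += v
        rw [hstep, if_neg hv, if_pos hchk]
        have hnz : hasZero (colCells rDone.length (pre ++ [rDone])) = false := by
          have h' := hm rDone.length
          rw [hchk] at h'
          simpa using h'.symm
        have hall : (colCells rDone.length (pre ++ [rDone])).all (fun x => x != 0) = true := by
          rw [all_ne_eq_not_hasZero, hnz]; rfl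
        have hres := ih (rDone ++ [v]) m (p + v) hlen'
          (by
            intro c
            rw [hm c]
            by_cases hc : c = rDone.length
            · subst hc
              rw [hceq]
              simp [hasZero, List.any_append, hv]
            · rw [hcne c hc])
          (by
            have hsum : ∀ c ∈ Finset.range W,
                sumTake c (pre ++ [rDone ++ [v]])
                  = sumTake c (pre ++ [rDone]) + (if c = rDone.length then v else 0) := by
              intro c _
              unfold sumTake
              by_cases hc : c = rDone.length
              · subst hc
                rw [hceq, takeWhile_append_singleton, if_pos hall, if_pos (by simp [hv]),
                  if_pos rfl, takeWhile_all_eq_self _ hall]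
                simp
              · rw [hcne c hc, if_neg hc]; simp
            rw [hp, psum, psum, Finset.sum_congr rfl hsum, Finset.sum_add_distrib,
              Finset.sum_ite_eq' (Finset.range W) rDone.length (fun _ => v),
              if_pos (Finset.mem_range.mpr hslt)])
        rw [hcast, hrw] at hres
        exact hres
      · -- haunted column, nonzero cell: skipped
        have hchk' : m.getD (PySem.Int.toStr (rDone.length : Int)) true = false := by
          revert hchk
          cases m.getD (PySem.Int.toStr (rDone.length : Int)) true <;> simp
        rw [hstep, if_neg hv, if_neg (by rw [hchk']; simp)]
        have hz : hasZero (colCells rDone.length (pre ++ [rDone])) = true := by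
          have h' := hm rDone.length
          rw [hchk'] at h'
          simpa using h'.symm
        have hnall : (colCells rDone.length (pre ++ [rDone])).all (fun x => x != 0) = false := by
          rw [all_ne_eq_not_hasZero, hz]; rfl
        have hres := ih (rDone ++ [v]) m p hlen'
          (by
            intro c
            rw [hm c]
            by_cases hc : c = rDone.length
            · subst hc
              rw [hceq]
              congr 1
              simp only [hasZero] at hz ⊢
              rw [List.any_append, hz]
              simp
            · rw [hcne c hc])
          (by
            rw [hp]
            apply Finset.sum_congr rfl
            intro c _
            unfold sumTake
            by_cases hc : c = rDone.length
            · subst hc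
              rw [hceq, takeWhile_append_singleton, if_neg (by rw [hnall]; simp)]
            · rw [hcne c hc])
        rw [hcast, hrw] at hres
        exact hres

-- the A-side outer loop: fold over the rows
lemma a_inv (W : Nat) :
    ∀ pre : List (List Int), (∀ r ∈ pre, r.length ≤ W) →
      (∀ c : Nat, (pre.foldl aRow (PySem.Dict.empty, 0)).1.getD (PySem.Int.toStr (c : Int)) true
          = !hasZero (colCells c pre)) ∧
      (pre.foldl aRow (PySem.Dict.empty, 0)).2 = psum W pre := by
  intro pre
  induction pre using List.reverseRecOn with
  | nil =>
    intro _
    constructor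
    · intro c; simp [colCells, hasZero, PySem.Dict.getD, PySem.Dict.get?, PySem.Dict.empty]
    · simp [psum, sumTake, colCells]
  | append_singleton pre r ih =>
    intro h
    have ih' := ih (fun r' hr' => h r' (by simp [hr']))
    rw [List.foldl_append]
    simp only [List.foldl_cons, List.foldl_nil]
    unfold aRow
    have hpre : ∀ c : Nat, colCells c (pre ++ [([] : List Int)]) = colCells c pre := by
      intro c; rw [colCells_append, colCells_singleton]; simp
    have := row_inv W pre r [] (pre.foldl aRow (PySem.Dict.empty, 0)).1
      (pre.foldl aRow (PySem.Dict.empty, 0)).2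
      (by simpa using h r (by simp))
      (by intro c; rw [hpre c]; exact ih'.1 c)
      (by
        rw [ih'.2]
        apply Finset.sum_congr rfl
        intro c _
        unfold sumTake
        rw [hpre c])
    simp only [List.length_nil, Nat.cast_zero, List.nil_append] at this
    exact this

lemma len_le_natWidth : ∀ (rows : List (List Int)) (a : Nat),
    a ≤ rows.foldl (fun acc r => max acc r.length) a ∧
    ∀ r ∈ rows, r.length ≤ rows.foldl (fun acc r => max acc r.length) a := by
  intro rows
  induction rows with
  | nil => intro a; simp
  | cons x xs ih =>
    intro a
    obtain ⟨h1, h2⟩ := ih (max a x.length)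
    refine ⟨le_trans (by omega) h1, ?_⟩
    intro r hr
    simp only [List.mem_cons] at hr
    rcases hr with rfl | hr
    · exact le_trans (by omega) h1
    · exact h2 r hr

lemma a_eq_psum (matrix : List (List Int)) :
    matrix_element_sum matrix = psum (natWidth matrix) matrix := by
  unfold matrix_element_sum
  exact (a_inv (natWidth matrix) matrix ((len_le_natWidth matrix 0).2)).2

-- ==== B side ====

lemma bCol_eq (rows : List (List Int)) : ∀ (c : Int) (p : Int), 0 ≤ c →
    bCol c rows p = p + sumTake c.toNat rows := by
  induction rows with
  | nil => intro c p _; simp [bCol, sumTake, colCells]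
  | cons row rest ih =>
    intro c p hc
    have hcol : colCells c.toNat (row :: rest)
        = (row[c.toNat]?).toList ++ colCells c.toNat rest := by
      cases h : row[c.toNat]? <;> simp [colCells, h]
    rw [bCol]
    by_cases hlen : c ≥ PySem.List.len row
    · rw [if_pos hlen]
      have : row[c.toNat]? = none := by
        apply List.getElem?_eq_none
        simp [PySem.List.len_eq] at hlen
        omega
      rw [ih c p hc]
      unfold sumTake
      rw [hcol, this]
      simp
    · rw [if_neg hlen]
      have hlt : c.toNat < row.length := by
        simp [PySem.List.len_eq] at hlen
        omega
      have hv : PySem.List.pyGetD row c 0 = row[c.toNat] := by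
        have h1 := PySem.List.pyGetD_natCast row c.toNat (0 : Int)
        rw [Int.toNat_of_nonneg hc] at h1
        rw [h1]
        exact List.getD_eq_getElem row 0 hlt
      have hsome : row[c.toNat]? = some row[c.toNat] := List.getElem?_eq_getElem hlt
      by_cases h0 : row[c.toNat] = 0
      · rw [if_pos (by rw [hv]; simp [h0])]
        unfold sumTake
        rw [hcol, hsome, h0]
        simp
      · rw [if_neg (by rw [hv]; simp [h0])]
        rw [hv, ih c (p + row[c.toNat]) hc]
        unfold sumTake
        rw [hcol, hsome]
        simp only [Option.toList_some, List.singleton_append, List.takeWhile_cons]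
        rw [if_pos (by simp [h0])]
        simp only [List.sum_cons]
        ring

lemma maxD_aux (f : Option Int → Int → Option Int)
    (hf : ∀ (m x : Int), f (some m) x = if m < x then some x else some m) :
    ∀ (rows : List (List Int)) (a : Nat),
      List.foldl f (some ((a : Nat) : Int)) (rows.map PySem.List.len)
        = some ((rows.foldl (fun acc r => max acc r.length) a : Nat) : Int) := by
  intro rows
  induction rows with
  | nil => intro a; simp
  | cons row rest ih =>
    intro a
    simp only [List.map_cons, List.foldl_cons, PySem.List.len]
    rw [hf]
    have : (if ((a : Nat) : Int) < (row.length : Int) then some ((row.length : Int))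
        else some ((a : Nat) : Int)) = some ((max a row.length : Nat) : Int) := by
      split_ifs with h
      · congr 1; omega
      · congr 1; omega
    rw [this, ih (max a row.length)]

lemma maxD_eq_natWidth (matrix : List (List Int)) :
    PySem.List.maxD (matrix.map PySem.List.len) (fun x => x) 0 = ((natWidth matrix : Nat) : Int) := by
  unfold PySem.List.maxD PySem.List.max? natWidth
  cases matrix with
  | nil => simp
  | cons row rest =>
    simp only [List.map_cons, List.foldl_cons, PySem.List.len]
    have h0 : (max 0 row.length) = row.length := by omega
    rw [maxD_aux _ (fun m x => rfl) rest row.length, h0]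
    rfl

lemma b_fold (matrix : List (List Int)) : ∀ (n : Nat) (a : Int),
    List.foldl (fun price c => bCol c matrix price) a ((List.range n).map (fun k => ((k : Nat) : Int)))
      = a + ∑ c ∈ Finset.range n, sumTake c matrix := by
  intro n
  induction n with
  | zero => intro a; simp
  | succ n ih =>
    intro a
    rw [List.range_succ, List.map_append, List.foldl_append, ih a]
    simp only [List.map_cons, List.map_nil, List.foldl_cons, List.foldl_nil]
    rw [bCol_eq matrix ((n : Nat) : Int) _ (by omega), Int.toNat_natCast, Finset.sum_range_succ]
    ring

lemma b_eq_psum (matrix : List (List Int)) :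
    matrix_element_sum_alt matrix = psum (natWidth matrix) matrix := by
  unfold matrix_element_sum_alt
  simp only [maxD_eq_natWidth, PySem.List.pyRange_zero_natCast]
  rw [b_fold matrix (natWidth matrix) 0]
  simp [psum]

-- ===== VERDICT (by name: the statement is the Claim_ definition above) =====
theorem matrix_element_sum_spec : Claim_equal_matrix_element_sum := by
  intro matrix _
  unfold Spec_matrix_element_sum
  rw [a_eq_psum, b_eq_psum]
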